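-- pv_equiv track=rewrite | github.com/cj81499/advent-of-code | src/aoc2018/day08.py | node_value
-- ===== SOURCE A (Python) =====
-- def node_value(tokens):
--     child_count = tokens.pop(0)
--     meta_entries = tokens.pop(0)
--     children = []
--     for _ in range(child_count):
--         children.append(node_value(tokens))
--     value = 0
--     if len(children) == 0:
--         for _ in range(meta_entries):
--             value += tokens.pop(0)
--     else:
--         for _ in range(meta_entries):
--             i = tokens.pop(0) - 1
--             if i < len(children):
--                 value += children[i]
--     return value
-- ===== SOURCE B (Python) =====
-- # Iterative parse with an explicit stack of (children_left, meta, child_values) frames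
-- # and an index pointer instead of A's recursion with tokens.pop(0); same metadata rule.
-- # B does not mutate `tokens` (A consumes the parsed prefix in place) -- the claimed
-- # equivalence is about the return value only.
-- def node_value(tokens):
--     child_count, meta = tokens[0], tokens[1]
--     i = 2
--     values = []
--     stack = []
--     while True:
--         if child_count > 0:
--             stack.append((child_count, meta, values))
--             child_count, meta = tokens[i], tokens[i + 1]
--             i += 2
--             values = []
--         else:
--             value = 0
--             if values:
--                 for _ in range(meta):
--                     m = tokens[i] - 1
--                     i += 1
--                     if m < len(values):
--                         value += values[m]
--             else:
--                 for _ in range(meta):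
--                     value += tokens[i]
--                     i += 1
--             if not stack:
--                 return value
--             child_count, meta, values = stack.pop()
--             child_count -= 1
--             values.append(value)
-- ===== Notes on version B (the rewrite author's own statement) =====
-- stated objective: alternative
-- what changed: Replaces A's recursive descent that repeatedly pops the front of the list (tokens.pop(0)) with an iterative parser using an explicit stack of (children_left, meta, child_values) frames and an index pointer, keeping the same leaf/internal metadata rule; B does not mutate the caller's list.
import Mathlib
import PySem

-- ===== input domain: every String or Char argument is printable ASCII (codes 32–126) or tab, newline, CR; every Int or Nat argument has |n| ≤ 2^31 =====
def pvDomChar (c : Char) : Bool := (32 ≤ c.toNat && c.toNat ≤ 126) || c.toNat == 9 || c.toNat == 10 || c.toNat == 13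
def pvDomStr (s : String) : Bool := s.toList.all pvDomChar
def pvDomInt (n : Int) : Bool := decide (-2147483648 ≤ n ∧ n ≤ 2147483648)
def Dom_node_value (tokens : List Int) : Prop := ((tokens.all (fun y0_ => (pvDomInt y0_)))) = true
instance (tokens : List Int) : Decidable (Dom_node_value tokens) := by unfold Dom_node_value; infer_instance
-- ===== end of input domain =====

-- B re-implements A's recursive descent as an iterative parse with an explicit stack of
-- (children_left, meta, child_values) frames and an index pointer, same metadata rule;
-- A mutates `tokens` in place (pops the parsed prefix), B does not: the equivalence proved
-- here is about the return value only.

-- ===== PORT A =====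
-- A is a recursive-descent evaluator popping tokens from the front; ported with a depth
-- fuel decremented once per tree level (`none` = the Python raises; fuel tokens.length + 1
-- exceeds any reachable depth).

-- the leaf loop: `for _ in range(meta_entries): value += tokens.pop(0)`
def metaLeafA : Nat → Int → List Int → Option (Int × List Int)
  | 0, acc, ts => some (acc, ts)
  | _ + 1, _, [] => none
  | n + 1, acc, t :: ts => metaLeafA n (acc + t) ts

-- the internal-node loop: `i = tokens.pop(0) - 1; if i < len(children): value += children[i]`
def metaIntA (children : List Int) : Nat → Int → List Int → Option (Int × List Int)
  | 0, acc, ts => some (acc, ts)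
  | _ + 1, _, [] => none
  | n + 1, acc, t :: ts =>
    if t - 1 < (children.length : Int) then
      match PySem.List.pyGet? children (t - 1) with
      | none => none
      | some c => metaIntA children n (acc + c) ts
    else metaIntA children n acc ts

-- `for _ in range(child_count): children.append(node_value(tokens))`; the recursive
-- call is passed in as `g` so the recursion is structural on the depth fuel
def childrenA (g : List Int → Option (Int × List Int)) :
    Nat → List Int → Option (List Int × List Int)
  | 0, ts => some ([], ts)
  | n + 1, ts =>
    match g ts with
    | none => none
    | some (v, ts1) =>
      match childrenA g n ts1 with
      | none => none
      | some (vs, ts2) => some (v :: vs, ts2)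

def nvGoA : Nat → List Int → Option (Int × List Int)
  | 0, _ => none
  | _ + 1, [] => none
  | _ + 1, [_] => none
  | f + 1, c :: m :: ts =>
    match childrenA (nvGoA f) c.toNat ts with
    | none => none
    | some (children, ts1) =>
      if children.length = 0 then metaLeafA m.toNat 0 ts1
      else metaIntA children m.toNat 0 ts1

def node_value (tokens : List Int) : Int :=
  match nvGoA (tokens.length + 1) tokens with
  | some (v, _) => v
  | none => 0

-- ===== PORT B =====
-- B parses iteratively with an explicit stack of (children_left, meta, child_values)
-- frames and an index pointer; the pointer is ported as the remaining token suffix.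
-- No fuel: each loop step shrinks tokens-remaining + stack-height.

-- `for _ in range(meta): value += tokens[i]; i += 1`
def leafSumB : Nat → Int → List Int → Option (Int × List Int)
  | 0, acc, ts => some (acc, ts)
  | _ + 1, _, [] => none
  | n + 1, acc, t :: ts => leafSumB n (acc + t) ts

-- `m = tokens[i] - 1; i += 1; if m < len(values): value += values[m]`
def idxSumB (values : List Int) : Nat → Int → List Int → Option (Int × List Int)
  | 0, acc, ts => some (acc, ts)
  | _ + 1, _, [] => none
  | n + 1, acc, t :: ts =>
    if t - 1 < (values.length : Int) then
      match PySem.List.pyGet? values (t - 1) with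
      | none => none
      | some c => idxSumB values n (acc + c) ts
    else idxSumB values n acc ts

-- the close step's metadata consumption: `if values: … else: …`
def metaPhaseB (me : Int) (values : List Int) (ts : List Int) : Option (Int × List Int) :=
  if values.isEmpty then leafSumB me.toNat 0 ts else idxSumB values me.toNat 0 ts

-- length facts cited by bLoop's termination proof
theorem leafSumB_len : ∀ (n : Nat) (acc : Int) (ts : List Int) (v : Int) (r : List Int),
    leafSumB n acc ts = some (v, r) → r.length ≤ ts.length := by
  intro n
  induction n with
  | zero => intro acc ts v r h; simp [leafSumB] at h; simp [h.2]
  | succ n ih =>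
    intro acc ts v r h
    cases ts with
    | nil => simp [leafSumB] at h
    | cons t ts =>
      have := ih (acc + t) ts v r h
      simp; omega

theorem idxSumB_len : ∀ (values : List Int) (n : Nat) (acc : Int) (ts : List Int) (v : Int) (r : List Int),
    idxSumB values n acc ts = some (v, r) → r.length ≤ ts.length := by
  intro values n
  induction n with
  | zero => intro acc ts v r h; simp [idxSumB] at h; simp [h.2]
  | succ n ih =>
    intro acc ts v r h
    cases ts with
    | nil => simp [idxSumB] at h
    | cons t ts =>
      simp only [idxSumB] at h
      split at h
      · cases hg : PySem.List.pyGet? values (t - 1) with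
        | none => rw [hg] at h; simp at h
        | some c =>
          rw [hg] at h
          have := ih (acc + c) ts v r h
          simp; omega
      · have := ih acc ts v r h
        simp; omega

theorem metaPhaseB_len (me : Int) (values ts : List Int) (v : Int) (r : List Int) :
    metaPhaseB me values ts = some (v, r) → r.length ≤ ts.length := by
  unfold metaPhaseB
  split
  · exact leafSumB_len _ _ _ _ _
  · exact idxSumB_len _ _ _ _ _ _

-- the `while True` loop; frames are (children_left, meta, child_values)
def bLoop (cl me : Int) (vals : List Int) (stk : List (Int × Int × List Int))
    (ts : List Int) : Option Int :=
  if 0 < cl then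
    match ts with
    | c :: m :: ts' => bLoop c m [] ((cl, me, vals) :: stk) ts'
    | _ => none
  else
    match _hm : metaPhaseB me vals ts with
    | none => none
    | some (v, r) =>
      match stk with
      | [] => some v
      | (cl', me', vals') :: stk' => bLoop (cl' - 1) me' (vals' ++ [v]) stk' r
termination_by ts.length + stk.length
decreasing_by
  · simp; omega
  · have := metaPhaseB_len me vals ts v r _hm
    simp; omega

def node_value_alt (tokens : List Int) : Int :=
  match tokens with
  | c :: m :: rest => (bLoop c m [] [] rest).getD 0
  | _ => 0

-- ===== PRECONDITION & SPEC =====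
-- Pre_: the token list starts with a complete tree whose internal-node metadata references
-- stay inside Python's index range; everywhere else Python A raises IndexError (pop from an
-- exhausted list, or children[i] with i < -len).  Checked by a structure-only scan that is
-- independent of both ports.

def chkMeta (k : Nat) : Nat → List Int → Option (List Int)
  | 0, ts => some ts
  | _ + 1, [] => none
  | n + 1, t :: ts => if k ≠ 0 ∧ t ≤ -(k : Int) then none else chkMeta k n ts

def chkCh (g : List Int → Option (List Int)) : Nat → List Int → Option (List Int)
  | 0, ts => some ts
  | n + 1, ts =>
    match g ts with
    | none => none
    | some ts1 => chkCh g n ts1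

def chkNode : Nat → List Int → Option (List Int)
  | 0, _ => none
  | _ + 1, [] => none
  | _ + 1, [_] => none
  | f + 1, c :: m :: ts =>
    match chkCh (chkNode f) c.toNat ts with
    | none => none
    | some ts1 => chkMeta c.toNat m.toNat ts1

def Pre_node_value (tokens : List Int) : Prop :=
  (chkNode (tokens.length + 1) tokens).isSome = true

instance (tokens : List Int) : Decidable (Pre_node_value tokens) := by
  unfold Pre_node_value; infer_instance

def pvWitness_node_value : List Int := [2, 2, 0, 2, 10, 11, 1, 1, 0, 1, 99, 2, 1, 2]

def Spec_node_value (tokens : List Int) (out : Int) : Prop := out = node_value_alt tokens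
instance (tokens : List Int) (out : Int) : Decidable (Spec_node_value tokens out) := by
  unfold Spec_node_value; infer_instance

-- ===== CLAIM (what is proved, stated in full; the proofs are below) =====
def Claim_equal_node_value : Prop :=
  ∀ (tokens : List Int), Dom_node_value tokens → Pre_node_value tokens →
    Spec_node_value tokens (node_value tokens)

-- ===== LEMMAS AND PROOFS =====

-- the close-cascade after a node's value v has been produced with suffix r remaining
def afterClose : List (Int × Int × List Int) → Int → List Int → Option Int
  | [], v, _ => some v
  | (cl, me, vals) :: stk, v, r => bLoop (cl - 1) me (vals ++ [v]) stk r

theorem metaLeaf_eq : ∀ (n : Nat) (acc : Int) (ts : List Int),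
    metaLeafA n acc ts = leafSumB n acc ts := by
  intro n
  induction n with
  | zero => intro acc ts; simp [metaLeafA, leafSumB]
  | succ n ih =>
    intro acc ts
    cases ts with
    | nil => simp [metaLeafA, leafSumB]
    | cons t ts => simp [metaLeafA, leafSumB, ih]

theorem metaInt_eq : ∀ (children : List Int) (n : Nat) (acc : Int) (ts : List Int),
    metaIntA children n acc ts = idxSumB children n acc ts := by
  intro children n
  induction n with
  | zero => intro acc ts; simp [metaIntA, idxSumB]
  | succ n ih =>
    intro acc ts
    cases ts with
    | nil => simp [metaIntA, idxSumB]
    | cons t ts =>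
      simp only [metaIntA, idxSumB]
      split
      · cases PySem.List.pyGet? children (t - 1) <;> simp [ih]
      · exact ih _ _

theorem chkMeta_leaf : ∀ (n : Nat) (ts r : List Int) (acc : Int),
    chkMeta 0 n ts = some r → ∃ v, metaLeafA n acc ts = some (v, r) := by
  intro n
  induction n with
  | zero => intro ts r acc h; simp [chkMeta] at h; exact ⟨acc, by simp [metaLeafA, h]⟩
  | succ n ih =>
    intro ts r acc h
    cases ts with
    | nil => simp [chkMeta] at h
    | cons t ts =>
      simp [chkMeta] at h
      exact ih ts r (acc + t) h

theorem chkMeta_int : ∀ (children : List Int) (n : Nat) (ts r : List Int) (acc : Int),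
    children ≠ [] → chkMeta children.length n ts = some r →
    ∃ v, metaIntA children n acc ts = some (v, r) := by
  intro children n
  induction n with
  | zero =>
    intro ts r acc _ h; simp [chkMeta] at h; exact ⟨acc, by simp [metaIntA, h]⟩
  | succ n ih =>
    intro ts r acc hne h
    cases ts with
    | nil => simp [chkMeta] at h
    | cons t ts =>
      have hk : children.length ≠ 0 := by simpa using hne
      simp only [chkMeta] at h
      split at h
      · exact absurd h (by simp)
      · rename_i hcond
        have ht : -(children.length : Int) < t := by
          by_contra hc
          exact hcond ⟨hk, by omega⟩
        simp only [metaIntA]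
        by_cases hlt : t - 1 < (children.length : Int)
        · have hr : PySem.Raise.InRange children.length (t - 1) := by
            constructor <;> omega
          have hnn : PySem.List.pyGet? children (t - 1) ≠ none :=
            fun hno => ((PySem.List.pyGet?_eq_none_iff children (t - 1)).1 hno) hr
          rcases Option.ne_none_iff_exists'.1 hnn with ⟨c, hc⟩
          rw [if_pos hlt, hc]
          exact ih ts r (acc + c) hne h
        · rw [if_neg hlt]
          exact ih ts r acc hne h

-- given the checker passed, A's metadata phase succeeds and B's close step computes the
-- same value from the collected child values
theorem metaPhase_node (k : Nat) (m : Int) (vs ts r : List Int) (hlen : vs.length = k)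
    (h : chkMeta k m.toNat ts = some r) :
    ∃ v, (if vs.length = 0 then metaLeafA m.toNat 0 ts else metaIntA vs m.toNat 0 ts)
            = some (v, r) ∧ metaPhaseB m vs ts = some (v, r) := by
  by_cases hvs : vs = []
  · subst hvs
    simp only [List.length_nil] at hlen
    rcases chkMeta_leaf m.toNat ts r 0 (by rw [← hlen] at h; exact h) with ⟨v, hv⟩
    exact ⟨v, by simp [hv], by simp [metaPhaseB, ← metaLeaf_eq, hv]⟩
  · rcases chkMeta_int vs m.toNat ts r 0 hvs (by rw [hlen]; exact h) with ⟨v, hv⟩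
    have hne : vs.length ≠ 0 := by simpa using hvs
    refine ⟨v, by simp [hne, hv], ?_⟩
    have : vs.isEmpty = false := by simpa [List.isEmpty_iff] using hvs
    simp [metaPhaseB, this, ← metaInt_eq, hv]

theorem bLoop_close (cl me : Int) (vals : List Int) (stk : List (Int × Int × List Int))
    (ts : List Int) (hcl : ¬ 0 < cl) :
    bLoop cl me vals stk ts
      = (metaPhaseB me vals ts).bind (fun p => afterClose stk p.1 p.2) := by
  rw [bLoop.eq_def, if_neg hcl]
  cases hm : metaPhaseB me vals ts with
  | none => simp
  | some p =>
    obtain ⟨v, r⟩ := p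
    cases stk with
    | nil => simp [afterClose]
    | cons f stk' => obtain ⟨cl', me', vals'⟩ := f; simp [afterClose]

theorem chkNode_shape (f : Nat) (ts r : List Int) (h : chkNode f ts = some r) :
    ∃ c m ts2, ts = c :: m :: ts2 := by
  match f, ts with
  | 0, ts => simp [chkNode] at h
  | _ + 1, [] => simp [chkNode] at h
  | _ + 1, [x] => simp [chkNode] at h
  | _ + 1, c :: m :: ts2 => exact ⟨c, m, ts2, rfl⟩

-- the simulation: wherever the checker succeeds, A's recursion produces a value and B's
-- stack machine, started on the same tokens with any pending stack, closes to the same value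
theorem mega : ∀ f : Nat,
    (∀ ts r, chkNode f ts = some r →
      ∃ v, nvGoA f ts = some (v, r) ∧
        ∀ c m ts2 stk, ts = c :: m :: ts2 → bLoop c m [] stk ts2 = afterClose stk v r)
    ∧ (∀ n ts r, chkCh (chkNode f) n ts = some r →
      ∃ vs, childrenA (nvGoA f) n ts = some (vs, r) ∧ vs.length = n ∧
        ∀ cl me vals stk, cl.toNat = n →
          bLoop cl me vals stk ts
            = (metaPhaseB me (vals ++ vs) r).bind (fun p => afterClose stk p.1 p.2)) := by
  intro f
  induction f with
  | zero =>
    constructor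
    · intro ts r h; simp [chkNode] at h
    · intro n ts r h
      cases n with
      | zero =>
        simp [chkCh] at h
        refine ⟨[], by simp [childrenA, h], rfl, ?_⟩
        intro cl me vals stk hcl
        have : ¬ 0 < cl := by omega
        rw [bLoop_close _ _ _ _ _ this, h]
        simp
      | succ n => simp [chkCh, chkNode] at h
  | succ f ih =>
    have hnode : ∀ ts r, chkNode (f + 1) ts = some r →
        ∃ v, nvGoA (f + 1) ts = some (v, r) ∧
          ∀ c m ts2 stk, ts = c :: m :: ts2 → bLoop c m [] stk ts2 = afterClose stk v r := by
      intro ts r h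
      obtain ⟨c, m, ts2, rfl⟩ := chkNode_shape _ _ _ h
      simp only [chkNode] at h
      cases hch : chkCh (chkNode f) c.toNat ts2 with
      | none => rw [hch] at h; simp at h
      | some ts1 =>
        rw [hch] at h
        simp only at h
        rcases ih.2 c.toNat ts2 ts1 hch with ⟨vs, hA, hlen, hM⟩
        rcases metaPhase_node c.toNat m vs ts1 r hlen h with ⟨v, hAv, hBv⟩
        refine ⟨v, ?_, ?_⟩
        · simp only [nvGoA, hA]
          exact hAv
        · intro c' m' ts2' stk heq
          injection heq with h1 heq; injection heq with h2 h3
          subst h1; subst h2; subst h3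
          rw [hM c m [] stk rfl]
          simp [hBv]
    refine ⟨hnode, ?_⟩
    intro n
    induction n with
    | zero =>
      intro ts r h
      simp [chkCh] at h
      refine ⟨[], by simp [childrenA, h], rfl, ?_⟩
      intro cl me vals stk hcl
      have : ¬ 0 < cl := by omega
      rw [bLoop_close _ _ _ _ _ this, h]
      simp
    | succ n ihn =>
      intro ts r h
      simp only [chkCh] at h
      cases hcn : chkNode (f + 1) ts with
      | none => rw [hcn] at h; simp at h
      | some ts1 =>
        rw [hcn] at h
        simp only at h
        rcases hnode ts ts1 hcn with ⟨v, hAv, hMv⟩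
        rcases ihn ts1 r h with ⟨vs, hAvs, hlen, hMvs⟩
        refine ⟨v :: vs, ?_, by simp [hlen], ?_⟩
        · simp only [childrenA, hAv, hAvs]
        · intro cl me vals stk hcl
          obtain ⟨c, m, ts2, rfl⟩ := chkNode_shape _ _ _ hcn
          have hclpos : 0 < cl := by omega
          rw [bLoop, if_pos hclpos]
          rw [hMv c m ts2 ((cl, me, vals) :: stk) rfl]
          have hAC : afterClose ((cl, me, vals) :: stk) v ts1
              = bLoop (cl - 1) me (vals ++ [v]) stk ts1 := rfl
          rw [hAC]
          have h1 : (cl - 1).toNat = n := by omega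
          rw [hMvs (cl - 1) me (vals ++ [v]) stk h1]
          rw [show (vals ++ [v]) ++ vs = vals ++ v :: vs by simp]

-- ===== VERDICT (by name: the statement is the Claim_ definition above) =====
theorem node_value_spec : Claim_equal_node_value := by
  unfold Claim_equal_node_value
  intro tokens _ hpre
  unfold Pre_node_value at hpre
  rcases Option.isSome_iff_exists.1 hpre with ⟨r, hr⟩
  obtain ⟨c, m, ts2, rfl⟩ := chkNode_shape _ _ _ hr
  rcases (mega ((c :: m :: ts2).length + 1)).1 _ _ hr with ⟨v, hA, hM⟩
  have h1 : node_value (c :: m :: ts2) = v := by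
    unfold node_value; rw [hA]
  have h2 : node_value_alt (c :: m :: ts2) = v := by
    show (bLoop c m [] [] ts2).getD 0 = v
    rw [hM c m ts2 [] rfl]
    rfl
  unfold Spec_node_value
  rw [h1, h2]
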